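-- pv_equiv track=rewrite | github.com/ethframe/derivatives | derivatives.py | absorbing_states
-- ===== SOURCE A (Python) =====
-- from collections import defaultdict, deque
--
-- def absorbing_states(rev_delta, accepting):
--     absorbing = set(rev_delta) - set(accepting)
--     queue = deque(accepting)
--     while queue:
--         state = queue.popleft()
--         prev_set = set()
--         for prev in rev_delta[state].values():
--             prev_set.update(prev)
--         queue.extend(absorbing & prev_set)
--         absorbing.difference_update(prev_set)
--     return absorbing
-- ===== SOURCE B (Python) =====
-- def absorbing_states(rev_delta, accepting):
--     # Chaotic iteration to a fixpoint (no worklist/queue): seed the reachable set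
--     # with the accepting states and their direct predecessors, then make repeated
--     # full passes over rev_delta.items() propagating reachability to predecessors
--     # until a whole pass changes nothing; finally subtract from the key set.
--     reachable = set(accepting)
--     for state in accepting:
--         for prevs in rev_delta[state].values():
--             reachable.update(prevs)
--     changed = True
--     while changed:
--         changed = False
--         for state, moves in rev_delta.items():
--             if state in reachable:
--                 for prevs in moves.values():
--                     for p in prevs:
--                         if p not in reachable:
--                             reachable.add(p)
--                             changed = True
--     return set(rev_delta) - reachable
-- ===== Notes on version B (the rewrite author's own statement) =====
-- stated objective: alternative
-- what changed: Replaced A's queue-driven BFS that shrinks the complement (absorbing) set with bulk set difference/intersection updates by worklist-free chaotic iteration: seed the reachable set with the accepting states and their direct predecessors, then repeat full passes over rev_delta.items() propagating reachability to predecessors until a whole pass changes nothing, and finish with one subtraction from the key set.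
import Mathlib
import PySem

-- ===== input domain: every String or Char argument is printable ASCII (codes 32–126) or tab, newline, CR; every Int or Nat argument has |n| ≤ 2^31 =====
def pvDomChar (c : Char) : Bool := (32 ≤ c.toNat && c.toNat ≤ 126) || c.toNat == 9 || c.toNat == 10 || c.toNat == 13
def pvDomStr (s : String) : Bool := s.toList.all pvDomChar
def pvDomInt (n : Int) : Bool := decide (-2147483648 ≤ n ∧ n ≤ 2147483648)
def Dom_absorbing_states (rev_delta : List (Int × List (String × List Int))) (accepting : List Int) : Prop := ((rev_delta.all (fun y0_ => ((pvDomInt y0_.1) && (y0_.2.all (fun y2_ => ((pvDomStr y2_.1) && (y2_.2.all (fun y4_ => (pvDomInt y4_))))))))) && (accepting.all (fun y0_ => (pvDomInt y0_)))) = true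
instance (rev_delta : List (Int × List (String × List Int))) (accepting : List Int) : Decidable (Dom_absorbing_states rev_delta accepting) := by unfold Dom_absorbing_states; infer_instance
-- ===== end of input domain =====

-- B replaces A's queue-driven BFS that shrinks the complement set with bulk set operations
-- by chaotic iteration: repeated full passes over rev_delta.items() propagating
-- reachability to predecessors until a whole pass changes nothing, then one subtraction
-- (objective: alternative; same return value wherever A returns).

-- ===== PORT A =====
-- prev_set = set(); for prev in rev_delta[state].values(): prev_set.update(prev)
def pvPrevSet (moves : List (String × List Int)) : PySem.Set Int :=
  (PySem.Dict.ofList moves).values.foldl (fun acc prev => PySem.Set.update acc prev) PySem.Set.empty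

-- while queue: state = queue.popleft(); …; queue.extend(absorbing & prev_set); absorbing.difference_update(prev_set)
def pvALoop (d : PySem.Dict Int (List (String × List Int)))
    (absorbing : PySem.Set Int) (queue : List Int) : PySem.Set Int :=
  match queue with
  | [] => absorbing
  | state :: rest =>
    let prevSet := pvPrevSet ((d.get? state).getD [])
    pvALoop d (PySem.Set.diff absorbing prevSet) (rest ++ PySem.Set.inter absorbing prevSet)
termination_by absorbing.length + queue.length
decreasing_by
  have h := (List.length_eq_length_filter_add
    (l := absorbing) (fun x => PySem.Set.contains (pvPrevSet ((d.get? state).getD [])) x))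
  simp only [PySem.Set.diff, PySem.Set.inter, List.length_append, List.length_cons]
  omega

def absorbing_states (rev_delta : List (Int × List (String × List Int))) (accepting : List Int) : List Int :=
  let d := PySem.Dict.ofList rev_delta
  pvALoop d (PySem.Set.diff (PySem.Set.ofList d.keys) (PySem.Set.ofList accepting)) accepting

-- ===== PORT B =====
-- if p not in reachable: reachable.add(p); changed = True      (state = (reachable, changed))
def pvAddP (acc : PySem.Set Int × Bool) (p : Int) : PySem.Set Int × Bool :=
  if PySem.Set.contains acc.1 p then acc else (PySem.Set.add acc.1 p, true)

-- for state, moves in rev_delta.items(): if state in reachable: for prevs in moves.values(): for p in prevs: …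
def pvPassItem (acc : PySem.Set Int × Bool) (it : Int × List (String × List Int)) :
    PySem.Set Int × Bool :=
  if PySem.Set.contains acc.1 it.1 then
    (PySem.Dict.ofList it.2).values.foldl (fun a prevs => prevs.foldl pvAddP a) acc
  else acc

-- one full pass of the inner for-loop (changed reset to false by the caller)
def pvPass (items : List (Int × List (String × List Int))) (acc : PySem.Set Int × Bool) :
    PySem.Set Int × Bool :=
  items.foldl pvPassItem acc

-- every element a pass can add comes from some prev list of some item
def pvUniv (items : List (Int × List (String × List Int))) : List Int :=
  (items.map (fun it => (PySem.Dict.ofList it.2).values.flatten)).flatten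

-- facts the fixpoint loop's termination argument cites
lemma pv_ncontains (s : PySem.Set Int) (x : Int) :
    (!PySem.Set.contains s x) = true ↔ x ∉ s := by
  cases hc : PySem.Set.contains s x
  · simp only [Bool.not_false, true_iff]
    intro hmem
    rw [(PySem.Set.contains_iff ..).mpr hmem] at hc
    exact Bool.true_eq_false.mp hc
  · simp only [Bool.not_true, Bool.false_eq_true, false_iff, not_not]
    exact (PySem.Set.contains_iff ..).mp hc

lemma pv_filter_le_of (l : List Int) (p q : Int → Bool) (h : ∀ x ∈ l, p x = true → q x = true) :
    (l.filter p).length ≤ (l.filter q).length := by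
  rw [← List.countP_eq_length_filter, ← List.countP_eq_length_filter]
  exact List.countP_mono_left h

lemma pv_filter_lt_of (l : List Int) (p q : Int → Bool) (h : ∀ x ∈ l, p x = true → q x = true)
    (k : Int) (hk : k ∈ l) (hq : q k = true) (hp : p k = false) :
    (l.filter p).length < (l.filter q).length := by
  obtain ⟨s, t, rfl⟩ := List.append_of_mem hk
  have h1 : (s.filter p).length ≤ (s.filter q).length :=
    pv_filter_le_of s p q (fun a ha => h a (by simp [ha]))
  have h2 : (t.filter p).length ≤ (t.filter q).length :=
    pv_filter_le_of t p q (fun a ha => h a (by simp [ha]))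
  simp only [List.filter_append, List.filter_cons, hq, hp, List.length_append,
    Bool.false_eq_true, if_false, if_pos, List.length_cons]
  omega

lemma pvAddP_sub (acc : PySem.Set Int × Bool) (p x : Int) (hx : x ∈ acc.1) :
    x ∈ (pvAddP acc p).1 := by
  unfold pvAddP
  split
  · exact hx
  · exact (PySem.Set.mem_add ..).mpr (Or.inl hx)



lemma pvAddFold_sub (ps : List Int) :
    ∀ (acc : PySem.Set Int × Bool) (x : Int), x ∈ acc.1 → x ∈ (ps.foldl pvAddP acc).1 := by
  induction ps with
  | nil => exact fun acc x hx => hx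
  | cons p t ih => exact fun acc x hx => ih _ x (pvAddP_sub acc p x hx)



lemma pvAddFold_true (ps : List Int) :
    ∀ (acc : PySem.Set Int × Bool), (ps.foldl pvAddP acc).2 = true →
      acc.2 = true ∨ ∃ x ∈ ps, x ∉ acc.1 ∧ x ∈ (ps.foldl pvAddP acc).1 := by
  induction ps with
  | nil => exact fun acc h => Or.inl h
  | cons p t ih =>
    intro acc h
    simp only [List.foldl_cons] at h ⊢
    rcases ih _ h with h' | ⟨x, hxt, hxn, hxm⟩
    · unfold pvAddP at h'
      split at h'
      · exact Or.inl h'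
      · rename_i hc
        refine Or.inr ⟨p, List.mem_cons_self .., fun hm => hc ((PySem.Set.contains_iff ..).mpr hm), ?_⟩
        refine pvAddFold_sub t _ p ?_
        unfold pvAddP
        rw [if_neg hc]
        exact (PySem.Set.mem_add ..).mpr (Or.inr rfl)
    · exact Or.inr ⟨x, List.mem_cons_of_mem _ hxt,
        fun hm => hxn (pvAddP_sub acc p x hm), hxm⟩

lemma pvVals_sub (L : List (List Int)) :
    ∀ (acc : PySem.Set Int × Bool) (x : Int), x ∈ acc.1 →
      x ∈ (L.foldl (fun a prevs => prevs.foldl pvAddP a) acc).1 := by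
  induction L with
  | nil => exact fun acc x hx => hx
  | cons v t ih => exact fun acc x hx => ih _ x (pvAddFold_sub v acc x hx)



lemma pvVals_true (L : List (List Int)) :
    ∀ (acc : PySem.Set Int × Bool), (L.foldl (fun a prevs => prevs.foldl pvAddP a) acc).2 = true →
      acc.2 = true ∨ ∃ x ∈ L.flatten, x ∉ acc.1 ∧
        x ∈ (L.foldl (fun a prevs => prevs.foldl pvAddP a) acc).1 := by
  induction L with
  | nil => exact fun acc h => Or.inl h
  | cons v t ih =>
    intro acc h
    simp only [List.foldl_cons] at h ⊢
    simp only [List.flatten_cons, List.mem_append]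
    rcases ih _ h with h' | ⟨x, hxt, hxn, hxm⟩
    · rcases pvAddFold_true v acc h' with h'' | ⟨x, hxv, hxn, hxm⟩
      · exact Or.inl h''
      · exact Or.inr ⟨x, Or.inl hxv, hxn, pvVals_sub t _ x hxm⟩
    · exact Or.inr ⟨x, Or.inr hxt, fun hm => hxn (pvAddFold_sub v acc x hm), hxm⟩

lemma pvItem_sub (acc : PySem.Set Int × Bool) (it : Int × List (String × List Int))
    (x : Int) (hx : x ∈ acc.1) : x ∈ (pvPassItem acc it).1 := by
  unfold pvPassItem
  split
  · exact pvVals_sub _ acc x hx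
  · exact hx



lemma pvItem_true (acc : PySem.Set Int × Bool) (it : Int × List (String × List Int))
    (h : (pvPassItem acc it).2 = true) :
    acc.2 = true ∨ ∃ x ∈ (PySem.Dict.ofList it.2).values.flatten, x ∉ acc.1 ∧ x ∈ (pvPassItem acc it).1 := by
  unfold pvPassItem at h ⊢
  by_cases hc : PySem.Set.contains acc.1 it.1 = true
  · rw [if_pos hc] at h ⊢
    exact pvVals_true _ acc h
  · rw [if_neg hc] at h
    exact Or.inl h


lemma pvPass_sub (items : List (Int × List (String × List Int))) :
    ∀ (acc : PySem.Set Int × Bool) (x : Int), x ∈ acc.1 → x ∈ (pvPass items acc).1 := by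
  induction items with
  | nil => exact fun acc x hx => hx
  | cons it t ih => exact fun acc x hx => ih _ x (pvItem_sub acc it x hx)

lemma pvPass_true (items : List (Int × List (String × List Int))) :
    ∀ (acc : PySem.Set Int × Bool), (pvPass items acc).2 = true →
      acc.2 = true ∨ ∃ x ∈ pvUniv items, x ∉ acc.1 ∧ x ∈ (pvPass items acc).1 := by
  induction items with
  | nil => exact fun acc h => Or.inl h
  | cons it t ih =>
    intro acc h
    have huniv : pvUniv (it :: t) = (PySem.Dict.ofList it.2).values.flatten ++ pvUniv t := rfl
    rcases ih _ h with h' | ⟨x, hxt, hxn, hxm⟩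
    · rcases pvItem_true acc it h' with h'' | ⟨x, hxv, hxn, hxm⟩
      · exact Or.inl h''
      · exact Or.inr ⟨x, by rw [huniv]; exact List.mem_append.mpr (Or.inl hxv), hxn,
          pvPass_sub t _ x hxm⟩
    · exact Or.inr ⟨x, by rw [huniv]; exact List.mem_append.mpr (Or.inr hxt),
        fun hm => hxn (pvItem_sub acc it x hm), hxm⟩

-- while changed: changed = False; <one pass>
def pvFix (items : List (Int × List (String × List Int))) (r : PySem.Set Int) : PySem.Set Int :=
  let res := pvPass items (r, false)
  if h : res.2 = true then pvFix items res.1 else res.1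
termination_by ((pvUniv items).filter (fun k => !(PySem.Set.contains r k))).length
decreasing_by
  rcases pvPass_true items (r, false) h with h' | ⟨x, hxu, hxn, hxm⟩
  · exact absurd h' (by simp)
  · refine pv_filter_lt_of (pvUniv items) _ _ ?_ x hxu ?_ ?_
    · intro y _ hy
      rw [pv_ncontains] at hy ⊢
      exact fun hm => hy (pvPass_sub items (r, false) y hm)
    · rw [pv_ncontains]; exact hxn
    · rw [← Bool.not_eq_true, pv_ncontains]
      exact fun hno => (hno hxm).elim

-- reachable = set(accepting); for state in accepting: for prevs in rev_delta[state].values(): reachable.update(prevs)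
-- (rev_delta[state] raises KeyError in Python where get? is none; those inputs are outside Pre_)
def pvSeed (d : PySem.Dict Int (List (String × List Int))) (accepting : List Int) : PySem.Set Int :=
  accepting.foldl
    (fun r a => (PySem.Dict.ofList ((d.get? a).getD [])).values.foldl
      (fun r prevs => PySem.Set.update r prevs) r)
    (PySem.Set.ofList accepting)

def absorbing_states_alt (rev_delta : List (Int × List (String × List Int))) (accepting : List Int) : List Int :=
  let d := PySem.Dict.ofList rev_delta
  PySem.Set.diff (PySem.Set.ofList d.keys) (pvFix d.items (pvSeed d accepting))

-- ===== PRECONDITION & SPEC =====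
-- Pre_ excludes exactly the inputs on which A raises KeyError: some accepting state that is
-- not a key of rev_delta (A looks every accepting state up in rev_delta).
def Pre_absorbing_states (rev_delta : List (Int × List (String × List Int))) (accepting : List Int) : Prop :=
  ∀ a ∈ accepting, a ∈ rev_delta.map Prod.fst
instance (rev_delta : List (Int × List (String × List Int))) (accepting : List Int) : Decidable (Pre_absorbing_states rev_delta accepting) := by unfold Pre_absorbing_states; infer_instance

def pvWitness_absorbing_states : (List (Int × List (String × List Int))) × List Int :=
  ([(0, [("a", [1])]), (1, []), (2, [("b", [2])])], [0])


def Spec_absorbing_states (rev_delta : List (Int × List (String × List Int))) (accepting : List Int) (out : List Int) : Prop := out = absorbing_states_alt rev_delta accepting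
instance (rev_delta : List (Int × List (String × List Int))) (accepting : List Int) (out : List Int) : Decidable (Spec_absorbing_states rev_delta accepting out) := by unfold Spec_absorbing_states; infer_instance

-- ===== CLAIM (what is proved, stated in full; the proofs are below) =====
def Claim_equal_absorbing_states : Prop := ∀ (rev_delta : List (Int × List (String × List Int))) (accepting : List Int), Dom_absorbing_states rev_delta accepting → Pre_absorbing_states rev_delta accepting → Spec_absorbing_states rev_delta accepting (absorbing_states rev_delta accepting)


-- ===== LEMMAS AND PROOFS =====

lemma pvAddP_mem (acc : PySem.Set Int × Bool) (p x : Int) (hx : x ∈ (pvAddP acc p).1) :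
    x ∈ acc.1 ∨ x = p := by
  unfold pvAddP at hx
  split at hx
  · exact Or.inl hx
  · exact (PySem.Set.mem_add ..).mp hx

lemma pvAddP_false (acc : PySem.Set Int × Bool) (p : Int) (h : (pvAddP acc p).2 = false) :
    pvAddP acc p = acc := by
  unfold pvAddP at h ⊢
  by_cases hc : PySem.Set.contains acc.1 p = true
  · rw [if_pos hc]
  · rw [if_neg hc] at h
    exact absurd h (by simp)

lemma pvAddFold_mem (ps : List Int) :
    ∀ (acc : PySem.Set Int × Bool) (x : Int), x ∈ (ps.foldl pvAddP acc).1 → x ∈ acc.1 ∨ x ∈ ps := by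
  induction ps with
  | nil => exact fun acc x hx => Or.inl hx
  | cons p t ih =>
    intro acc x hx
    rcases ih _ x hx with hx | hx
    · rcases pvAddP_mem acc p x hx with hx | rfl
      · exact Or.inl hx
      · exact Or.inr (List.mem_cons_self ..)
    · exact Or.inr (List.mem_cons_of_mem _ hx)

lemma pvAddFold_false (ps : List Int) :
    ∀ (acc : PySem.Set Int × Bool), (ps.foldl pvAddP acc).2 = false → ps.foldl pvAddP acc = acc := by
  induction ps with
  | nil => exact fun acc _ => rfl
  | cons p t ih =>
    intro acc h
    simp only [List.foldl_cons] at h ⊢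
    have hid := ih _ h
    rw [hid] at h
    rw [hid, pvAddP_false acc p h]

lemma pvVals_mem (L : List (List Int)) :
    ∀ (acc : PySem.Set Int × Bool) (x : Int),
      x ∈ (L.foldl (fun a prevs => prevs.foldl pvAddP a) acc).1 → x ∈ acc.1 ∨ x ∈ L.flatten := by
  induction L with
  | nil => exact fun acc x hx => Or.inl hx
  | cons v t ih =>
    intro acc x hx
    simp only [List.flatten_cons, List.mem_append]
    rcases ih _ x hx with hx | hx
    · rcases pvAddFold_mem v acc x hx with hx | hx
      · exact Or.inl hx
      · exact Or.inr (Or.inl hx)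
    · exact Or.inr (Or.inr hx)

lemma pvVals_false (L : List (List Int)) :
    ∀ (acc : PySem.Set Int × Bool), (L.foldl (fun a prevs => prevs.foldl pvAddP a) acc).2 = false →
      L.foldl (fun a prevs => prevs.foldl pvAddP a) acc = acc := by
  induction L with
  | nil => exact fun acc _ => rfl
  | cons v t ih =>
    intro acc h
    simp only [List.foldl_cons] at h ⊢
    have hid := ih _ h
    rw [hid] at h
    rw [hid, pvAddFold_false v acc h]

lemma pvItem_mem (acc : PySem.Set Int × Bool) (it : Int × List (String × List Int))
    (x : Int) (hx : x ∈ (pvPassItem acc it).1) :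
    x ∈ acc.1 ∨ (it.1 ∈ acc.1 ∧ x ∈ (PySem.Dict.ofList it.2).values.flatten) := by
  unfold pvPassItem at hx
  split at hx
  · rename_i hg
    rcases pvVals_mem _ acc x hx with h | h
    · exact Or.inl h
    · exact Or.inr ⟨(PySem.Set.contains_iff ..).mp hg, h⟩
  · exact Or.inl hx

lemma pvItem_false (acc : PySem.Set Int × Bool) (it : Int × List (String × List Int))
    (h : (pvPassItem acc it).2 = false) : pvPassItem acc it = acc := by
  unfold pvPassItem at h ⊢
  by_cases hc : PySem.Set.contains acc.1 it.1 = true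
  · rw [if_pos hc] at h ⊢
    exact pvVals_false _ acc h
  · rw [if_neg hc]

lemma pvPassFold_false (items : List (Int × List (String × List Int))) :
    ∀ (acc : PySem.Set Int × Bool), (pvPass items acc).2 = false → pvPass items acc = acc := by
  induction items with
  | nil => exact fun acc _ => rfl
  | cons it t ih =>
    intro acc h
    have h' : (pvPass t (pvPassItem acc it)).2 = false := h
    have hid := ih _ h'
    have h0 : (pvPassItem acc it).2 = false := by rw [hid] at h'; exact h'
    calc pvPass (it :: t) acc = pvPass t (pvPassItem acc it) := rfl
      _ = pvPassItem acc it := hid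
      _ = acc := pvItem_false acc it h0


-- the predecessors A and B both read for a state q: union of rev_delta[q].values()
def pvPreds (d : PySem.Dict Int (List (String × List Int))) (q : Int) : List Int :=
  (PySem.Dict.ofList ((d.get? q).getD [])).values.flatten

-- states that can reach an accepting state along reversed transitions through keys of d
inductive pvReach (d : PySem.Dict Int (List (String × List Int))) (accepting : List Int) : Int → Prop
  | base (x : Int) : x ∈ accepting → pvReach d accepting x
  | step (q x : Int) : pvReach d accepting q → q ∈ d.keys → x ∈ pvPreds d q → pvReach d accepting x

lemma mem_pvPrevSet (moves : List (String × List Int)) (x : Int) :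
    x ∈ pvPrevSet moves ↔ x ∈ (PySem.Dict.ofList moves).values.flatten := by
  have h : pvPrevSet moves = PySem.Set.ofList (PySem.Dict.ofList moves).values.flatten := by
    unfold pvPrevSet
    rw [PySem.Set.ofList_eq_foldl, List.foldl_flatten]
    rfl
  rw [h]
  exact PySem.Set.mem_ofList ..

lemma pv_keys_ofList (rd : List (Int × List (String × List Int))) (a : Int) :
    a ∈ (PySem.Dict.ofList rd).keys ↔ a ∈ rd.map Prod.fst := by
  have h : (PySem.Dict.ofList rd).keys = PySem.Set.ofList (rd.map Prod.fst) :=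
    PySem.Dict.keys_foldl_insert_key rd Prod.fst (fun d x => x.2) PySem.Dict.empty
  rw [h]
  exact PySem.Set.mem_ofList ..

lemma pvALoop_filter (d : PySem.Dict Int (List (String × List Int))) :
    ∀ (absorbing : PySem.Set Int) (queue : List Int),
      ∃ p, pvALoop d absorbing queue = absorbing.filter p := by
  intro absorbing queue
  induction absorbing, queue using pvALoop.induct d with
  | case1 absorbing =>
    rw [pvALoop]
    exact ⟨fun _ => true, (List.filter_true _).symm⟩
  | case2 absorbing state rest S ih =>
    obtain ⟨p, hp⟩ := ih
    rw [pvALoop]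
    refine ⟨fun a => p a && !(PySem.Set.contains (pvPrevSet ((d.get? state).getD [])) a), ?_⟩
    rw [hp]
    exact List.filter_filter ..

lemma pvALoop_char (d : PySem.Dict Int (List (String × List Int))) (accepting : List Int) :
    ∀ (absorbing : PySem.Set Int) (queue : List Int),
      (∀ x ∈ absorbing, x ∈ d.keys) →
      (∀ x ∈ d.keys, x ∉ absorbing → pvReach d accepting x) →
      (∀ q ∈ queue, pvReach d accepting q ∧ q ∈ d.keys) →
      (∀ q ∈ d.keys, q ∉ absorbing → q ∈ queue ∨ ∀ p ∈ pvPreds d q, p ∉ absorbing) →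
      (∀ x ∈ absorbing, x ∉ accepting) →
      (∀ x ∈ d.keys, x ∉ pvALoop d absorbing queue → pvReach d accepting x) ∧
      (∀ x ∈ pvALoop d absorbing queue, x ∉ accepting) ∧
      (∀ q ∈ d.keys, q ∉ pvALoop d absorbing queue →
        ∀ p ∈ pvPreds d q, p ∉ pvALoop d absorbing queue) := by
  intro absorbing queue
  induction absorbing, queue using pvALoop.induct d with
  | case1 absorbing =>
    intro h0 h1 h2 h3 h4
    rw [pvALoop]
    refine ⟨h1, h4, ?_⟩
    intro q hq hqa p hp
    rcases h3 q hq hqa with hqueue | hexp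
    · exact absurd hqueue (List.not_mem_nil)
    · exact hexp p hp
  | case2 absorbing state rest S ih =>
    intro h0 h1 h2 h3 h4
    rw [pvALoop]
    obtain ⟨hreach_s, hkey_s⟩ := h2 state (List.mem_cons_self ..)
    have hSpreds : ∀ x, x ∈ pvPrevSet ((d.get? state).getD []) ↔ x ∈ pvPreds d state :=
      fun x => mem_pvPrevSet ((d.get? state).getD []) x
    apply ih
    · intro x hx
      exact h0 x ((PySem.Set.mem_diff ..).mp hx).1
    · intro x hxk hx
      by_cases hxa : x ∈ absorbing
      · have hxS : x ∈ pvPrevSet ((d.get? state).getD []) := by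
          by_contra hxS
          exact hx ((PySem.Set.mem_diff ..).mpr ⟨hxa, hxS⟩)
        exact pvReach.step state x hreach_s hkey_s ((hSpreds x).mp hxS)
      · exact h1 x hxk hxa
    · intro q hq
      rcases List.mem_append.mp hq with hq | hq
      · exact h2 q (List.mem_cons_of_mem _ hq)
      · obtain ⟨hqa, hqS⟩ := (PySem.Set.mem_inter ..).mp hq
        exact ⟨pvReach.step state q hreach_s hkey_s ((hSpreds q).mp hqS), h0 q hqa⟩
    · intro q hqk hq
      by_cases hqa : q ∈ absorbing
      · have hqS : q ∈ pvPrevSet ((d.get? state).getD []) := by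
          by_contra hqS
          exact hq ((PySem.Set.mem_diff ..).mpr ⟨hqa, hqS⟩)
        exact Or.inl (List.mem_append.mpr (Or.inr ((PySem.Set.mem_inter ..).mpr ⟨hqa, hqS⟩)))
      · rcases h3 q hqk hqa with hqq | hexp
        · rcases List.mem_cons.mp hqq with rfl | hqrest
          · refine Or.inr ?_
            intro p hp hpd
            exact ((PySem.Set.mem_diff ..).mp hpd).2 ((hSpreds p).mpr hp)
          · exact Or.inl (List.mem_append.mpr (Or.inl hqrest))
        · refine Or.inr ?_
          intro p hp hpd
          exact hexp p hp ((PySem.Set.mem_diff ..).mp hpd).1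
    · intro x hx
      exact h4 x ((PySem.Set.mem_diff ..).mp hx).1

lemma pvA_char (d : PySem.Dict Int (List (String × List Int))) (accepting : List Int)
    (hpre : ∀ a ∈ accepting, a ∈ d.keys) (x : Int) :
    x ∈ pvALoop d (PySem.Set.diff (PySem.Set.ofList d.keys) (PySem.Set.ofList accepting)) accepting
      ↔ x ∈ d.keys ∧ ¬ pvReach d accepting x := by
  have hmem0 : ∀ y, y ∈ PySem.Set.diff (PySem.Set.ofList d.keys) (PySem.Set.ofList accepting) ↔
      (y ∈ d.keys ∧ y ∉ accepting) := by
    intro y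
    rw [PySem.Set.mem_diff, PySem.Set.mem_ofList, PySem.Set.mem_ofList]
  obtain ⟨C1, C3, Cclosed⟩ := pvALoop_char d accepting
      (PySem.Set.diff (PySem.Set.ofList d.keys) (PySem.Set.ofList accepting)) accepting
    (fun y hy => ((hmem0 y).mp hy).1)
    (fun y hyk hy => by
      by_cases hya : y ∈ accepting
      · exact pvReach.base y hya
      · exact absurd ((hmem0 y).mpr ⟨hyk, hya⟩) hy)
    (fun q hq => ⟨pvReach.base q hq, hpre q hq⟩)
    (fun q hqk hq => by
      by_cases hqa : q ∈ accepting
      · exact Or.inl hqa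
      · exact absurd ((hmem0 q).mpr ⟨hqk, hqa⟩) hq)
    (fun y hy => ((hmem0 y).mp hy).2)
  have hnotR : ∀ y, pvReach d accepting y →
      y ∉ pvALoop d (PySem.Set.diff (PySem.Set.ofList d.keys) (PySem.Set.ofList accepting)) accepting := by
    intro y hy
    induction hy with
    | base y hy => exact fun hmem => C3 y hmem hy
    | step q y hq hkq hp ihq => exact fun hmem => Cclosed q hkq ihq y hp hmem
  constructor
  · intro hmem
    obtain ⟨p, hp⟩ := pvALoop_filter d
      (PySem.Set.diff (PySem.Set.ofList d.keys) (PySem.Set.ofList accepting)) accepting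
    rw [hp] at hmem
    have hxd := List.mem_filter.mp hmem |>.1
    exact ⟨((hmem0 x).mp hxd).1, fun hr => hnotR x hr (by rw [hp]; exact hmem)⟩
  · rintro ⟨hk, hnr⟩
    by_contra hmem
    exact hnr (C1 x hk hmem)

-- B-side: soundness of one pass (everything added is reachable)
lemma pvPass_sound (d : PySem.Dict Int (List (String × List Int))) (accepting : List Int)
    (hnd : d.keys.Nodup) :
    ∀ (items : List (Int × List (String × List Int))), (∀ it ∈ items, it ∈ d.items) →
      ∀ (acc : PySem.Set Int × Bool), (∀ x ∈ acc.1, pvReach d accepting x) →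
      ∀ x ∈ (pvPass items acc).1, pvReach d accepting x := by
  intro items
  induction items with
  | nil => exact fun _ acc h x hx => h x hx
  | cons it t ih =>
    intro hits acc hacc x hx
    refine ih (fun it' h => hits it' (List.mem_cons_of_mem _ h)) (pvPassItem acc it) ?_ x hx
    intro y hy
    rcases pvItem_mem acc it y hy with hy | ⟨hg, hy⟩
    · exact hacc y hy
    · have hitmem : it ∈ d.items := hits it (List.mem_cons_self ..)
      have hkey : it.1 ∈ d.keys := PySem.Dict.mem_keys_of_mem_items d hitmem
      have hget : d.get? it.1 = some it.2 :=
        PySem.Dict.get?_of_mem_items d hitmem hnd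
      have hpredy : y ∈ pvPreds d it.1 := by
        unfold pvPreds
        rw [hget]
        exact hy
      exact pvReach.step it.1 y (hacc it.1 hg) hkey hpredy

-- closedness extracted from a pass whose changed flag stayed false
lemma pvAddFold_closed (ps : List Int) :
    ∀ (r : PySem.Set Int), (ps.foldl pvAddP (r, false)).2 = false → ∀ p ∈ ps, p ∈ r := by
  induction ps with
  | nil => intro r _ p hp; exact absurd hp (List.not_mem_nil)
  | cons q t ih =>
    intro r h p hp
    simp only [List.foldl_cons] at h
    have hq : PySem.Set.contains r q = true := by
      by_contra hc
      have hstep : pvAddP (r, false) q = (PySem.Set.add r q, true) := by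
        unfold pvAddP
        rw [if_neg hc]
      rw [hstep] at h
      rw [pvAddFold_false t _ h] at h
      exact absurd h (by simp)
    have hstep : pvAddP (r, false) q = (r, false) := by
      unfold pvAddP
      rw [if_pos hq]
    rw [hstep] at h
    rcases List.mem_cons.mp hp with rfl | hp
    · exact (PySem.Set.contains_iff ..).mp hq
    · exact ih r h p hp

lemma pvVals_closed (L : List (List Int)) :
    ∀ (r : PySem.Set Int), (L.foldl (fun a prevs => prevs.foldl pvAddP a) (r, false)).2 = false →
      ∀ p ∈ L.flatten, p ∈ r := by
  induction L with
  | nil => intro r _ p hp; simp at hp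
  | cons v t ih =>
    intro r h p hp
    simp only [List.foldl_cons] at h
    have hv : (v.foldl pvAddP (r, false)).2 = false := by
      have hid := pvVals_false t _ h
      rw [hid] at h
      exact h
    rw [pvAddFold_false v _ hv] at h
    simp only [List.flatten_cons, List.mem_append] at hp
    rcases hp with hp | hp
    · exact pvAddFold_closed v r hv p hp
    · exact ih r h p hp

lemma pvPass_closed (items : List (Int × List (String × List Int))) :
    ∀ (r : PySem.Set Int), (pvPass items (r, false)).2 = false →
      ∀ it ∈ items, it.1 ∈ r → ∀ p ∈ (PySem.Dict.ofList it.2).values.flatten, p ∈ r := by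
  induction items with
  | nil => intro r _ it hit; exact absurd hit (List.not_mem_nil)
  | cons it0 t ih =>
    intro r h it hit hkey p hp
    have h' : (pvPass t (pvPassItem (r, false) it0)).2 = false := h
    have h0 : (pvPassItem (r, false) it0).2 = false := by
      have hid := pvPassFold_false t _ h'
      rw [hid] at h'
      exact h'
    rw [pvItem_false _ _ h0] at h'
    replace h := h' 
    rcases List.mem_cons.mp hit with rfl | hit
    · unfold pvPassItem at h0
      rw [if_pos ((PySem.Set.contains_iff ..).mpr hkey)] at h0
      exact pvVals_closed _ r h0 p hp
    · exact ih r h it hit hkey p hp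

-- while changed: … (the loop returns reachable when a pass makes no change)
lemma pvFix_sub (items : List (Int × List (String × List Int))) :
    ∀ (r : PySem.Set Int) (x : Int), x ∈ r → x ∈ pvFix items r := by
  intro r
  induction r using pvFix.induct items with
  | case1 r res h ih =>
    intro x hx
    rw [pvFix]
    simp only [res] at *
    rw [dif_pos h]
    exact ih x (pvPass_sub items (r, false) x hx)
  | case2 r res h =>
    intro x hx
    rw [pvFix]
    simp only [res] at *
    rw [dif_neg h]
    exact pvPass_sub items (r, false) x hx

lemma pvFix_sound (d : PySem.Dict Int (List (String × List Int))) (accepting : List Int)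
    (hnd : d.keys.Nodup)
    (items : List (Int × List (String × List Int))) (hits : ∀ it ∈ items, it ∈ d.items) :
    ∀ (r : PySem.Set Int), (∀ x ∈ r, pvReach d accepting x) →
      ∀ x ∈ pvFix items r, pvReach d accepting x := by
  intro r
  induction r using pvFix.induct items with
  | case1 r res h ih =>
    intro hr x hx
    rw [pvFix] at hx
    simp only [res] at *
    rw [dif_pos h] at hx
    exact ih (fun y hy => pvPass_sound d accepting hnd items hits (r, false) hr y hy) x hx
  | case2 r res h =>
    intro hr x hx
    rw [pvFix] at hx
    simp only [res] at *
    rw [dif_neg h] at hx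
    exact pvPass_sound d accepting hnd items hits (r, false) hr x hx

lemma pvFix_closed (items : List (Int × List (String × List Int))) :
    ∀ (r : PySem.Set Int), ∀ it ∈ items, it.1 ∈ pvFix items r →
      ∀ p ∈ (PySem.Dict.ofList it.2).values.flatten, p ∈ pvFix items r := by
  intro r
  induction r using pvFix.induct items with
  | case1 r res h ih =>
    intro it hit hkey p hp
    rw [pvFix] at hkey ⊢
    simp only [res] at *
    rw [dif_pos h] at hkey ⊢
    exact ih it hit hkey p hp
  | case2 r res h =>
    intro it hit hkey p hp
    rw [pvFix] at hkey ⊢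
    simp only [res] at *
    rw [dif_neg h] at hkey ⊢
    have hfalse : (pvPass items (r, false)).2 = false := by
      rw [← Bool.not_eq_true]; exact h
    have hid : pvPass items (r, false) = (r, false) := pvPassFold_false items (r, false) hfalse
    rw [hid] at hkey ⊢
    exact pvPass_closed items r hfalse it hit hkey p hp

lemma pvUpdFold_mem (L : List (List Int)) :
    ∀ (r : PySem.Set Int) (x : Int),
      x ∈ L.foldl (fun r prevs => PySem.Set.update r prevs) r ↔ x ∈ r ∨ x ∈ L.flatten := by
  induction L with
  | nil => intro r x; simp
  | cons v t ih =>
    intro r x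
    simp only [List.foldl_cons, List.flatten_cons, List.mem_append]
    rw [ih, PySem.Set.mem_update]
    tauto

lemma pvSeedFold_mem (d : PySem.Dict Int (List (String × List Int))) (l : List Int) :
    ∀ (r : PySem.Set Int) (x : Int),
      x ∈ l.foldl (fun r a => (PySem.Dict.ofList ((d.get? a).getD [])).values.foldl
          (fun r prevs => PySem.Set.update r prevs) r) r ↔
        x ∈ r ∨ ∃ a ∈ l, x ∈ pvPreds d a := by
  induction l with
  | nil => intro r x; simp
  | cons a t ih =>
    intro r x
    simp only [List.foldl_cons]
    rw [ih, pvUpdFold_mem]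
    constructor
    · rintro ((hx | hx) | ⟨a', ha', hx⟩)
      · exact Or.inl hx
      · exact Or.inr ⟨a, List.mem_cons_self .., hx⟩
      · exact Or.inr ⟨a', List.mem_cons_of_mem _ ha', hx⟩
    · rintro (hx | ⟨a', ha', hx⟩)
      · exact Or.inl (Or.inl hx)
      · rcases List.mem_cons.mp ha' with rfl | ha'
        · exact Or.inl (Or.inr hx)
        · exact Or.inr ⟨a', ha', hx⟩

lemma pvSeed_mem (d : PySem.Dict Int (List (String × List Int))) (accepting : List Int) (x : Int) :
    x ∈ pvSeed d accepting ↔ x ∈ accepting ∨ ∃ a ∈ accepting, x ∈ pvPreds d a := by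
  unfold pvSeed
  rw [pvSeedFold_mem, PySem.Set.mem_ofList]

lemma pvB_char (d : PySem.Dict Int (List (String × List Int))) (accepting : List Int)
    (hnd : d.keys.Nodup) (hpre : ∀ a ∈ accepting, a ∈ d.keys) (x : Int) :
    x ∈ pvFix d.items (pvSeed d accepting) ↔ pvReach d accepting x := by
  constructor
  · refine pvFix_sound d accepting hnd d.items (fun it h => h) (pvSeed d accepting) ?_ x
    intro y hy
    rcases (pvSeed_mem d accepting y).mp hy with hy | ⟨a, ha, hy⟩
    · exact pvReach.base y hy
    · exact pvReach.step a y (pvReach.base a ha) (hpre a ha) hy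
  · intro hr
    induction hr with
    | base y hy =>
      exact pvFix_sub d.items (pvSeed d accepting) y
        ((pvSeed_mem d accepting y).mpr (Or.inl hy))
    | step q y hq hkq hp ihq =>
      have hsome : ∃ v, d.get? q = some v := by
        cases hv : d.get? q with
        | none => exact absurd hkq ((PySem.Dict.get?_eq_none_iff_not_mem_keys ..).mp hv)
        | some v => exact ⟨v, rfl⟩
      obtain ⟨v, hv⟩ := hsome
      have hitem : (q, v) ∈ d.items := PySem.Dict.mem_items_of_get?_eq_some d hv
      have hpred : y ∈ (PySem.Dict.ofList v).values.flatten := by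
        unfold pvPreds at hp
        rw [hv] at hp
        exact hp
      exact pvFix_closed d.items (pvSeed d accepting) (q, v) hitem ihq y hpred

lemma pv_mem_filter_iff (l : List Int) (p : Int → Bool) (x : Int) (hx : x ∈ l) :
    p x = true ↔ x ∈ l.filter p := by
  simp [List.mem_filter, hx]

-- ===== VERDICT (by name: the statement is the Claim_ definition above) =====
theorem absorbing_states_spec : Claim_equal_absorbing_states := by
  intro rd acc _ hpre
  unfold Spec_absorbing_states
  simp only [absorbing_states, absorbing_states_alt]
  have hpre' : ∀ a ∈ acc, a ∈ (PySem.Dict.ofList rd).keys :=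
    fun a ha => (pv_keys_ofList rd a).mpr (hpre a ha)
  obtain ⟨pA, hpA⟩ := pvALoop_filter (PySem.Dict.ofList rd)
    (PySem.Set.diff (PySem.Set.ofList (PySem.Dict.ofList rd).keys) (PySem.Set.ofList acc)) acc
  have E1 : pvALoop (PySem.Dict.ofList rd)
      (PySem.Set.diff (PySem.Set.ofList (PySem.Dict.ofList rd).keys) (PySem.Set.ofList acc)) acc
      = (PySem.Set.ofList (PySem.Dict.ofList rd).keys).filter
          (fun a => pA a && !(PySem.Set.contains (PySem.Set.ofList acc) a)) := by
    rw [hpA]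
    exact List.filter_filter ..
  rw [E1]
  show _ = (PySem.Set.ofList (PySem.Dict.ofList rd).keys).filter
      (fun a => !(PySem.Set.contains (pvFix (PySem.Dict.ofList rd).items (pvSeed (PySem.Dict.ofList rd) acc)) a))
  apply List.filter_congr
  intro x hxl
  have hxk : x ∈ (PySem.Dict.ofList rd).keys := (PySem.Set.mem_ofList ..).mp hxl
  apply Bool.eq_iff_iff.mpr
  have hmemA : (pA x && !(PySem.Set.contains (PySem.Set.ofList acc) x)) = true ↔
      x ∈ pvALoop (PySem.Dict.ofList rd)
        (PySem.Set.diff (PySem.Set.ofList (PySem.Dict.ofList rd).keys) (PySem.Set.ofList acc)) acc := by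
    rw [E1]
    exact pv_mem_filter_iff _ (fun a => pA a && !(PySem.Set.contains (PySem.Set.ofList acc) a)) x hxl
  rw [hmemA, pvA_char (PySem.Dict.ofList rd) acc hpre' x]
  have hB := pvB_char (PySem.Dict.ofList rd) acc (PySem.Dict.nodup_keys_ofList rd) hpre' x
  constructor
  · rintro ⟨-, hnr⟩
    cases hcb : PySem.Set.contains (pvFix (PySem.Dict.ofList rd).items (pvSeed (PySem.Dict.ofList rd) acc)) x
    · rfl
    · exact (hnr (hB.mp ((PySem.Set.contains_iff ..).mp hcb))).elim
  · intro hc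
    refine ⟨hxk, fun hr => ?_⟩
    rw [(PySem.Set.contains_iff ..).mpr (hB.mpr hr)] at hc
    simp at hc
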